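-- pv_equiv track=rewrite | github.com/d6ewasupervisor-netizen/D6-Fuel | public/fetch_pog_images.py | best_url
-- ===== SOURCE A (Python) =====
-- SIZE_PREF = ["xlarge", "large", "medium", "small", "thumbnail"]
--
-- def best_url(sizes):
--     """Highest-quality URL for one perspective (case-insensitive size names)."""
--     if not sizes:
--         return ""
--     by_name = {}
--     for s in sizes:
--         name = str(s.get("size", "")).strip().lower()
--         if name:
--             by_name[name] = s.get("url", "")
--     for p in SIZE_PREF:
--         if by_name.get(p):
--             return by_name[p]
--     return sizes[0].get("url", "") if sizes else ""
-- ===== SOURCE B (Python) =====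
-- SIZE_PREF = ["xlarge", "large", "medium", "small", "thumbnail"]
--
-- def _last_match(sizes, p):
--     """Last entry whose normalized size name equals p (dict overwrite semantics)."""
--     for s in reversed(sizes):
--         if str(s.get("size", "")).strip().lower() == p:
--             return s
--     return None
--
-- def best_url(sizes):
--     if not sizes:
--         return ""
--     for p in SIZE_PREF:
--         s = _last_match(sizes, p)
--         if s is not None:
--             url = s.get("url", "")
--             if url:
--                 return url
--     return sizes[0].get("url", "")
-- ===== Notes on version B (the rewrite author's own statement) =====
-- stated objective: simpler
-- what changed: Drops the by_name dict entirely: for each size preference B scans the list once from the end for the last entry with that (stripped, lowercased) name, mirroring dict overwrite without building one.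
import Mathlib
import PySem

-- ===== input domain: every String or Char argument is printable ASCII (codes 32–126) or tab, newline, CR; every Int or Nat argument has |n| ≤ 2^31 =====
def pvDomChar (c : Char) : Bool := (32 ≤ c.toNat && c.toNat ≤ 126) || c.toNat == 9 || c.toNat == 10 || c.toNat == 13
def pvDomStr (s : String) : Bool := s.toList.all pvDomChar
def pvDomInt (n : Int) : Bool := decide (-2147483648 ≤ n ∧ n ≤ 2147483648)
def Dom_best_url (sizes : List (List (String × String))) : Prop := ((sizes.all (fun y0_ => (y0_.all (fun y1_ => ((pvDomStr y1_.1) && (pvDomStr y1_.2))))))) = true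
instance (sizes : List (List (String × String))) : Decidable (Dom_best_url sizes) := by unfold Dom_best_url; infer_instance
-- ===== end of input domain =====

-- B changes structure only: it drops A's by_name dict and scans from the end per preference; equivalence of the two return values is proved below.

-- shared primitive: Python's s.get(k, "") on one entry-dict (first match in the association list)
def getS (s : List (String × String)) (k : String) : String :=
  (PySem.Dict.mk s).getD k ""

-- normalized size name: str(s.get("size","")).strip().lower()
def normName (s : List (String × String)) : String :=
  PySem.Str.lower (PySem.Str.strip (getS s "size"))

def SIZE_PREF : List String := ["xlarge", "large", "medium", "small", "thumbnail"]

-- ===== PORT A =====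
-- the by_name-building loop
def buildStep (d : PySem.Dict String String) (s : List (String × String)) : PySem.Dict String String :=
  let name := normName s
  if name ≠ "" then d.insert name (getS s "url") else d

-- the 'for p in SIZE_PREF: if by_name.get(p): return by_name[p]' loop
def pickA (byName : PySem.Dict String String) : List String → Option String
  | [] => none
  | p :: rest =>
    if byName.getD p "" ≠ "" then some (byName.getD p "") else pickA byName rest

def best_url (sizes : List (List (String × String))) : String :=
  match sizes with
  | [] => ""
  | s0 :: _ =>
    let byName := sizes.foldl buildStep PySem.Dict.empty
    match pickA byName SIZE_PREF with
    | some u => u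
    | none => getS s0 "url"

-- ===== PORT B =====
-- _last_match: first match over reversed(sizes)
def lastMatch (sizes : List (List (String × String))) (p : String) :
    Option (List (String × String)) :=
  sizes.reverse.find? (fun s => normName s == p)

-- the 'for p in SIZE_PREF' loop of B
def pickB (sizes : List (List (String × String))) : List String → Option String
  | [] => none
  | p :: rest =>
    match lastMatch sizes p with
    | some s => if getS s "url" ≠ "" then some (getS s "url") else pickB sizes rest
    | none => pickB sizes rest

def best_url_alt (sizes : List (List (String × String))) : String :=
  match sizes with
  | [] => ""
  | s0 :: _ =>
    match pickB sizes SIZE_PREF with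
    | some u => u
    | none => getS s0 "url"

-- ===== PRECONDITION & SPEC =====
def Spec_best_url (sizes : List (List (String × String))) (out : String) : Prop := out = best_url_alt sizes
instance (sizes : List (List (String × String))) (out : String) : Decidable (Spec_best_url sizes out) := by unfold Spec_best_url; infer_instance

-- ===== CLAIM (what is proved, stated in full; the proofs are below) =====
def Claim_equal_best_url : Prop := ∀ (sizes : List (List (String × String))), Dom_best_url sizes → Spec_best_url sizes (best_url sizes)

-- ===== LEMMAS AND PROOFS =====

-- key lemma: a lookup in the dict built by A's loop equals B's last-match scan
theorem getD_build (p : String) (hp : p ≠ "") :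
    ∀ (l : List (List (String × String))) (d : PySem.Dict String String),
      (l.foldl buildStep d).getD p "" =
        match l.reverse.find? (fun s => normName s == p) with
        | some s => getS s "url"
        | none => d.getD p "" := by
  intro l
  induction l with
  | nil => intro d; simp
  | cons s t ih =>
    intro d
    simp only [List.foldl_cons, List.reverse_cons, List.find?_append]
    rw [ih]
    cases hfind : t.reverse.find? (fun s => normName s == p) with
    | some u => simp
    | none =>
      simp only [Option.none_or]
      by_cases hn : normName s = p
      · simp [buildStep, hn, hp, PySem.Dict.getD_insert_self]
      · have hb : (normName s == p) = false := beq_eq_false_iff_ne.mpr hn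
        have : (List.find? (fun s => normName s == p) [s]) = none := by
          simp [List.find?, hb]
        simp only [this]
        unfold buildStep
        by_cases hne : normName s ≠ ""
        · simp only [if_pos hne]
          rw [PySem.Dict.getD_insert_of_ne]
          exact fun h => hn h.symm
        · simp [hne]

theorem pick_eq (sizes : List (List (String × String))) :
    ∀ (prefs : List String), (∀ p ∈ prefs, p ≠ "") →
      pickA (sizes.foldl buildStep PySem.Dict.empty) prefs = pickB sizes prefs := by
  intro prefs
  induction prefs with
  | nil => intro _; rfl
  | cons p rest ih =>
    intro h
    have hp : p ≠ "" := h p (by simp)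
    have hrest := ih (fun q hq => h q (by simp [hq]))
    simp only [pickA, pickB, lastMatch]
    rw [getD_build p hp sizes PySem.Dict.empty]
    cases hfind : sizes.reverse.find? (fun s => normName s == p) with
    | some u => simp [hrest]
    | none => simp [PySem.Dict.getD_empty, hrest]

-- ===== VERDICT (by name: the statement is the Claim_ definition above) =====
theorem best_url_spec : Claim_equal_best_url := by
  intro sizes _
  unfold Spec_best_url best_url best_url_alt
  cases sizes with
  | nil => rfl
  | cons s0 rest =>
    simp only
    rw [pick_eq (s0 :: rest) SIZE_PREF (by decide)]
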